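-- pv_equiv track=rewrite | github.com/DongYun666/leetcode | 塞克竞赛/宝藏.py | check
-- ===== SOURCE A (Python) =====
-- def check(x):
--     flag = False
--     temp = []
--     while x != 0:
--         temp.append(x%10)
--         x//=10
--     for i in range(1,len(temp)):
--         temp[i] = abs(temp[i]-temp[i-1])
--         if temp[i]<5:
--             return False
--     return True
-- ===== SOURCE B (Python) =====
-- def check(x):
--     if x == 0:
--         return True
--     prev = x % 10
--     x //= 10
--     while x != 0:
--         cur = abs(x % 10 - prev)
--         if cur < 5:
--             return False
--         prev = cur
--         x //= 10
--     return True
-- ===== Notes on version B (the rewrite author's own statement) =====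
-- stated objective: simpler
-- what changed: B fuses A's two phases (build the full digit list, then mutate it in place while scanning) into one streaming pass that keeps only a scalar prev, never materializing a list.
import Mathlib
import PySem

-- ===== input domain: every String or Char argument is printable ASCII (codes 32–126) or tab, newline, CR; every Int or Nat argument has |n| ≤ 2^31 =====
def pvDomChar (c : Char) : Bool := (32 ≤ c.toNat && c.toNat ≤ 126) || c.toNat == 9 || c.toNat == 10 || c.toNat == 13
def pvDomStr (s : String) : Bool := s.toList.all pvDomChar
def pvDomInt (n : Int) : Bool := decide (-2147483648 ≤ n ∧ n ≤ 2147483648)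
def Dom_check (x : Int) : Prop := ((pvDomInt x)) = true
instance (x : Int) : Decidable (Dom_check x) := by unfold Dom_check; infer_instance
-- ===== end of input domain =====

-- B fuses A's list-building-then-mutating two-phase scan into one streaming pass over
-- the digits keeping only a scalar `prev`; return values only (A mutates no argument).

-- ===== PORT A =====
-- `while x != 0: temp.append(x%10); x//=10` — fuel makes the loop total; for any
-- x ≥ 0 the fuel x.toNat + 1 suffices (x shrinks strictly each step).
def checkDigits (x : Int) (fuel : Nat) : List Int :=
  match fuel with
  | 0 => []
  | fuel + 1 =>
    if x = 0 then []
    else PySem.Int.mod x 10 :: checkDigits (PySem.Int.floordiv x 10) fuel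

-- `for i in range(1, len(temp))`: temp[i] is overwritten with abs(temp[i]-temp[i-1])
-- before being read as temp[i-1] at the next step, so the loop carries the previous
-- (mutated) entry.
def checkFor (prev : Int) : List Int → Bool
  | [] => true
  | d :: rest =>
    let c := |d - prev|
    if c < 5 then false else checkFor c rest

def check (x : Int) : Bool :=
  match checkDigits x (x.toNat + 1) with
  | [] => true
  | d :: rest => checkFor d rest

-- ===== PORT B =====
-- `while x != 0: cur = abs(x%10 - prev); …; x //= 10` — same fuel convention.
def checkAltLoop (prev : Int) (x : Int) (fuel : Nat) : Bool :=
  match fuel with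
  | 0 => true
  | fuel + 1 =>
    if x = 0 then true
    else
      let cur := |PySem.Int.mod x 10 - prev|
      if cur < 5 then false else checkAltLoop cur (PySem.Int.floordiv x 10) fuel

def check_alt (x : Int) : Bool :=
  if x = 0 then true
  else checkAltLoop (PySem.Int.mod x 10) (PySem.Int.floordiv x 10) (x.toNat + 1)

-- ===== PRECONDITION & SPEC =====
-- A's `while x != 0: x //= 10` never terminates for negative x (x//10 stabilises at -1),
-- so Pre_ excludes x < 0, on which A diverges (and so does B).
def Pre_check (x : Int) : Prop := 0 ≤ x
instance (x : Int) : Decidable (Pre_check x) := by unfold Pre_check; infer_instance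

def pvWitness_check : Int := 61616

def Spec_check (x : Int) (out : Bool) : Prop := out = check_alt x
instance (x : Int) (out : Bool) : Decidable (Spec_check x out) := by unfold Spec_check; infer_instance

-- ===== CLAIM (what is proved, stated in full; the proofs are below) =====
def Claim_equal_check : Prop := ∀ (x : Int), Dom_check x → Pre_check x → Spec_check x (check x)

-- ===== LEMMAS AND PROOFS =====

theorem check_div_lt (x : Int) (hx : 0 < x) :
    (PySem.Int.floordiv x 10).toNat < x.toNat := by
  rw [PySem.Int.floordiv_eq_ediv_of_pos (by omega)]
  omega

theorem check_div_nonneg (x : Int) (hx : 0 ≤ x) :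
    0 ≤ PySem.Int.floordiv x 10 := by
  rw [PySem.Int.floordiv_eq_ediv_of_pos (by omega)]
  omega

-- the fused loop of B computes A's two-phase result, fuel-independently once enough
theorem check_loops_agree (f : Nat) :
    ∀ (g : Nat) (x prev : Int), 0 ≤ x → x.toNat < f → x.toNat < g →
      checkFor prev (checkDigits x f) = checkAltLoop prev x g := by
  induction f with
  | zero => intro g x prev _ hf _; omega
  | succ f ih =>
    intro g x prev hx hf hg
    match g with
    | 0 => omega
    | g + 1 =>
      by_cases h0 : x = 0
      · simp [checkDigits, checkAltLoop, h0, checkFor]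
      · have hx' : 0 < x := lt_of_le_of_ne hx (Ne.symm h0)
        have hlt := check_div_lt x hx'
        simp only [checkDigits, checkAltLoop, h0, if_false, checkFor,
          ih g (PySem.Int.floordiv x 10) (|PySem.Int.mod x 10 - prev|)
            (check_div_nonneg x hx) (by omega : (PySem.Int.floordiv x 10).toNat < f)
            (by omega : (PySem.Int.floordiv x 10).toNat < g)]

-- ===== VERDICT (by name: the statement is the Claim_ definition above) =====
theorem check_spec : Claim_equal_check := by
  intro x _ hpre
  unfold Spec_check check check_alt
  by_cases h0 : x = 0
  · simp [h0, checkDigits]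
  · have hx : 0 < x := lt_of_le_of_ne hpre (Ne.symm h0)
    have hlt := check_div_lt x hx
    simp only [checkDigits, h0, if_false]
    exact check_loops_agree x.toNat (x.toNat + 1) (PySem.Int.floordiv x 10)
      (PySem.Int.mod x 10) (check_div_nonneg x hpre) (by omega) (by omega)
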